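-- pv_equiv track=rewrite | github.com/CColike/Soochow-University-CS | python/2027405033-exp-8.py | jia
-- ===== SOURCE A (Python) =====
-- def jia(s,n=5):#加密
--     s = s + ' '
--     ss = ''
--     j = 0
--     for i in s:
--         o = ord(i)
--         if o in range(48, 58):#判断并联系连在一起的整数
--             j = j * 10 + o - 48
--         elif j != 0:
--             ss = ss + str(j * 5)
--             j = 0
--         if o in range(97, 123):
--             ss = ss + chr((o +n-96) % 26 + 96)
--         if o in range(65, 91):
--             ss = ss + chr((o +n-64) % 26 + 64)
--     return ss
-- ===== SOURCE B (Python) =====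
-- def jia(s, n=5):
--     out = []
--     i = 0
--     L = len(s)
--     while i < L:
--         c = s[i]
--         if '0' <= c <= '9':
--             v = 0
--             while i < L and '0' <= s[i] <= '9':
--                 v = v * 10 + ord(s[i]) - 48
--                 i += 1
--             if v != 0:
--                 out.append(str(v * 5))
--         else:
--             o = ord(c)
--             if 97 <= o <= 122:
--                 out.append(chr((o + n - 96) % 26 + 96))
--             elif 65 <= o <= 90:
--                 out.append(chr((o + n - 64) % 26 + 64))
--             i += 1
--     return ''.join(out)
-- ===== Notes on version B (the rewrite author's own statement) =====
-- stated objective: alternative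
-- what changed: Replaces A's single flat pass with a sentinel space and persistent pending-integer state by a run-based scan (outer loop over positions, inner loop consuming each maximal digit run) that appends pieces to a list joined once at the end.
import Mathlib
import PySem

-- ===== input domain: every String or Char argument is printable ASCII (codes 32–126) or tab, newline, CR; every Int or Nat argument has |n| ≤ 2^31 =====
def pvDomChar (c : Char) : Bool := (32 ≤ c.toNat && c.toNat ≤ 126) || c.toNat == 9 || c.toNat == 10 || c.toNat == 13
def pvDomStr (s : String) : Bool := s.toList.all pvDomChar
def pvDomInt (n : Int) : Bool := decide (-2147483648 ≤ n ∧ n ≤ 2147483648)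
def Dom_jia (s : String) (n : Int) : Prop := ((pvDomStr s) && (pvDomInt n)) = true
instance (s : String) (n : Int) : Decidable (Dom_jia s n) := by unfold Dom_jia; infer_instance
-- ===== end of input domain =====

-- B replaces A's flat pass (sentinel space + pending-integer state) by a nested run-scanning
-- loop building a list of pieces; same cost, 'alternative' objective.

-- chr((o + n - base) % 26 + base), the shift expression both Pythons contain literally
def pvShiftChr (base : Int) (n : Int) (o : Int) : Char :=
  Char.ofNat (PySem.Int.mod (o + n - base) 26 + base).toNat

-- ===== PORT A =====
-- one iteration of A's for-loop body, state = (ss as List Char, j)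
def jiaStep (n : Int) (st : List Char × Int) (c : Char) : List Char × Int :=
  let o : Int := (c.toNat : Int)
  let st1 :=
    if 48 ≤ o ∧ o < 58 then (st.1, st.2 * 10 + o - 48)
    else if st.2 ≠ 0 then (st.1 ++ PySem.Int.toChars (st.2 * 5), (0 : Int))
    else st
  let st2 := if 97 ≤ o ∧ o < 123 then (st1.1 ++ [pvShiftChr 96 n o], st1.2) else st1
  let st3 := if 65 ≤ o ∧ o < 91 then (st2.1 ++ [pvShiftChr 64 n o], st2.2) else st2
  st3

def jia (s : String) (n : Int) : String :=
  String.mk (((s.toList ++ [' ']).foldl (jiaStep n) ([], 0)).1)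

-- ===== PORT B =====
-- the inner while loop: consume a maximal digit run into v, returning (v, rest)
def jiaRun (v : Int) : List Char → Int × List Char
  | [] => (v, [])
  | c :: cs =>
    if '0' ≤ c ∧ c ≤ '9' then jiaRun (v * 10 + (c.toNat : Int) - 48) cs
    else (v, c :: cs)

-- the 'if v != 0: out.append(str(v * 5))' piece for a finished run
def jiaPiece (v : Int) : List Char :=
  if v ≠ 0 then PySem.Int.toChars (v * 5) else []

-- the else-branch of B's outer loop: shifted letter or nothing
def jiaChar (n : Int) (c : Char) : List Char :=
  let o : Int := (c.toNat : Int)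
  if 97 ≤ o ∧ o ≤ 122 then [pvShiftChr 96 n o]
  else if 65 ≤ o ∧ o ≤ 90 then [pvShiftChr 64 n o]
  else []

theorem jiaRun_len_le (v : Int) (l : List Char) : (jiaRun v l).2.length ≤ l.length := by
  induction l generalizing v with
  | nil => simp [jiaRun]
  | cons c cs ih =>
    simp only [jiaRun]
    split
    · exact le_trans (ih _) (by simp)
    · simp

-- B's outer while loop
def jiaGo (n : Int) : List Char → List Char
  | [] => []
  | c :: cs =>
    if h : '0' ≤ c ∧ c ≤ '9' then
      jiaPiece (jiaRun 0 (c :: cs)).1 ++ jiaGo n (jiaRun 0 (c :: cs)).2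
    else
      jiaChar n c ++ jiaGo n cs
termination_by l => l.length
decreasing_by
  · have : jiaRun 0 (c :: cs) = jiaRun (0 * 10 + (c.toNat : Int) - 48) cs := by
      simp only [jiaRun, if_pos h]
    rw [this]
    exact Nat.lt_succ_of_le (jiaRun_len_le _ cs)
  · simp

def jia_alt (s : String) (n : Int) : String :=
  String.mk (jiaGo n s.toList)

-- ===== PRECONDITION & SPEC =====
def Spec_jia (s : String) (n : Int) (out : String) : Prop := out = jia_alt s n
instance (s : String) (n : Int) (out : String) : Decidable (Spec_jia s n out) := by unfold Spec_jia; infer_instance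

-- ===== CLAIM (what is proved, stated in full; the proofs are below) =====
def Claim_equal_jia : Prop := ∀ (s : String) (n : Int), Dom_jia s n → Spec_jia s n (jia s n)

-- ===== LEMMAS AND PROOFS =====

-- jiaGlue n j l: what A's loop appends to ss when the remaining input is l ++ [' '] and pending integer is j
def jiaGlue (n : Int) (j : Int) : List Char → List Char
  | [] => jiaPiece j
  | c :: cs =>
    if '0' ≤ c ∧ c ≤ '9' then jiaGlue n (j * 10 + (c.toNat : Int) - 48) cs
    else jiaPiece j ++ jiaChar n c ++ jiaGlue n 0 cs

theorem jiaStep_digit (n : Int) (st : List Char × Int) (c : Char)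
    (h : '0' ≤ c ∧ c ≤ '9') :
    jiaStep n st c = (st.1, st.2 * 10 + (c.toNat : Int) - 48) := by
  have h1' : 48 ≤ c.toNat := h.1
  have h2' : c.toNat ≤ 57 := h.2
  simp only [jiaStep]
  split_ifs with h1 h2 h3 h4 h5 h6 <;> first | rfl | (exfalso; omega)

theorem jiaStep_nondigit (n : Int) (st : List Char × Int) (c : Char)
    (h : ¬ ('0' ≤ c ∧ c ≤ '9')) :
    jiaStep n st c = (st.1 ++ jiaPiece st.2 ++ jiaChar n c, 0) := by
  have h' : ¬ (48 ≤ c.toNat ∧ c.toNat ≤ 57) := fun hc => h ⟨hc.1, hc.2⟩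
  obtain ⟨ss, j⟩ := st
  simp only [jiaStep, jiaPiece, jiaChar]
  split_ifs <;> first | (exfalso; omega) | simp_all

-- A's fold computes jiaGlue
theorem foldA_glue (n : Int) (l : List Char) (acc : List Char) (j : Int) :
    ((l ++ [' ']).foldl (jiaStep n) (acc, j)).1 = acc ++ jiaGlue n j l := by
  induction l generalizing acc j with
  | nil =>
    simp only [List.nil_append, List.foldl_cons, List.foldl_nil, jiaGlue]
    rw [jiaStep_nondigit n (acc, j) ' ' (by decide)]
    have hsp : jiaChar n ' ' = [] := by
      simp only [jiaChar]
      rw [if_neg (by decide), if_neg (by decide)]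
    simp [hsp]
  | cons c cs ih =>
    simp only [List.cons_append, List.foldl_cons, jiaGlue]
    by_cases h : '0' ≤ c ∧ c ≤ '9'
    · rw [jiaStep_digit n (acc, j) c h, if_pos h, ih]
    · rw [jiaStep_nondigit n (acc, j) c h, if_neg h, ih]
      simp

-- jiaRun's leftover is empty or starts with a non-digit
theorem jiaRun_rest (v : Int) (l : List Char) :
    (jiaRun v l).2 = [] ∨ ∃ c cs, (jiaRun v l).2 = c :: cs ∧ ¬ ('0' ≤ c ∧ c ≤ '9') := by
  induction l generalizing v with
  | nil => left; simp [jiaRun]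
  | cons c cs ih =>
    simp only [jiaRun]
    by_cases h : '0' ≤ c ∧ c ≤ '9'
    · rw [if_pos h]; exact ih _
    · rw [if_neg h]; right; exact ⟨c, cs, rfl, h⟩

-- jiaGlue absorbs a digit run exactly like jiaRun
theorem jiaGlue_run (n : Int) (l : List Char) (j : Int) :
    jiaGlue n j l =
      jiaPiece (jiaRun j l).1 ++
        (match (jiaRun j l).2 with
          | [] => []
          | c :: cs => jiaChar n c ++ jiaGlue n 0 cs) := by
  induction l generalizing j with
  | nil => simp [jiaRun, jiaGlue]
  | cons c cs ih =>
    simp only [jiaGlue, jiaRun]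
    by_cases h : '0' ≤ c ∧ c ≤ '9'
    · rw [if_pos h, if_pos h, ih]
    · rw [if_neg h, if_neg h]
      simp

-- B computes jiaGlue from pending 0
theorem jiaGo_eq_glue (n : Int) : ∀ (k : Nat) (l : List Char), l.length ≤ k →
    jiaGo n l = jiaGlue n 0 l := by
  intro k
  induction k with
  | zero =>
    intro l hl
    have : l = [] := by cases l <;> simp_all
    subst this
    simp [jiaGo, jiaGlue, jiaPiece]
  | succ k ih =>
    intro l hl
    match l with
    | [] => simp [jiaGo, jiaGlue, jiaPiece]
    | c :: cs =>
      by_cases h : '0' ≤ c ∧ c ≤ '9'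
      · rw [jiaGo, dif_pos h, jiaGlue_run n (c :: cs) 0]
        congr 1
        have hlen : (jiaRun 0 (c :: cs)).2.length ≤ cs.length := by
          have : jiaRun 0 (c :: cs) = jiaRun (0 * 10 + (c.toNat : Int) - 48) cs := by
            simp only [jiaRun, if_pos h]
          rw [this]; exact jiaRun_len_le _ cs
        rcases jiaRun_rest 0 (c :: cs) with he | ⟨c', cs', he, hc'⟩
        · rw [he]; simp [jiaGo]
        · rw [he, jiaGo, dif_neg hc']
          rw [he] at hlen
          have : cs'.length ≤ k := by simp at hl hlen; omega
          rw [ih cs' this]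
      · rw [jiaGo, dif_neg h, jiaGlue, if_neg h, ih cs (by simp at hl; omega)]
        simp [jiaPiece]

-- ===== VERDICT (by name: the statement is the Claim_ definition above) =====
theorem jia_spec : Claim_equal_jia := by
  intro s n _
  unfold Spec_jia jia jia_alt
  rw [foldA_glue, jiaGo_eq_glue n s.toList.length s.toList le_rfl]
  simp
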